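-- pv_equiv track=rewrite | github.com/M4skEl/ComputersNetworks | Network2/network2client.py | calculate_hamming_code
-- ===== SOURCE A (Python) =====
-- G = [[1, 1, 0, 1, 0, 0, 0],
--      [0, 1, 1, 0, 1, 0, 0],
--      [0, 0, 1, 1, 0, 1, 0],
--      [0, 0, 0, 1, 1, 0, 1]]
--
-- def calculate_hamming_code(message):
--     # Параметры кода
--     k = len(message)
--     r = len(G[0])
--     n = k + r
--     # Получаем кодовое слово умножением на порождающую матрицу
--     code_word = []
--     for i in range(r):
--         s = 0
--         for j in range(k):
--             s += message[j] * G[j][i]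
--         code_word.append(s % 2)
--     return code_word
-- ===== SOURCE B (Python) =====
-- # All 16 possible codewords, precomputed once: entry i is the Hamming codeword
-- # of the 4-bit parity pattern whose bit j is (i >> j) & 1.
-- CODEWORDS = [[0, 0, 0, 0, 0, 0, 0], [1, 1, 0, 1, 0, 0, 0], [0, 1, 1, 0, 1, 0, 0],
--              [1, 0, 1, 1, 1, 0, 0], [0, 0, 1, 1, 0, 1, 0], [1, 1, 1, 0, 0, 1, 0],
--              [0, 1, 0, 1, 1, 1, 0], [1, 0, 0, 0, 1, 1, 0], [0, 0, 0, 1, 1, 0, 1],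
--              [1, 1, 0, 0, 1, 0, 1], [0, 1, 1, 1, 0, 0, 1], [1, 0, 1, 0, 0, 0, 1],
--              [0, 0, 1, 0, 1, 1, 1], [1, 1, 1, 1, 1, 1, 1], [0, 1, 0, 0, 0, 1, 1],
--              [1, 0, 0, 1, 0, 1, 1]]
--
-- def calculate_hamming_code(message):
--     # Pack the parities of the message bits into a table index, then look the
--     # codeword up: no matrix multiplication at run time.
--     index = 0
--     for j, m in enumerate(message):
--         index |= (m % 2) << j
--     return list(CODEWORDS[index])
-- ===== Notes on version B (the rewrite author's own statement) =====
-- stated objective: alternative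
-- what changed: B precomputes all 16 possible codewords in a lookup table and at run time only packs the message parities (m % 2) into a table index, replacing A's generator-matrix multiplication (7 column sums over the message) by a single indexed lookup.
import Mathlib
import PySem

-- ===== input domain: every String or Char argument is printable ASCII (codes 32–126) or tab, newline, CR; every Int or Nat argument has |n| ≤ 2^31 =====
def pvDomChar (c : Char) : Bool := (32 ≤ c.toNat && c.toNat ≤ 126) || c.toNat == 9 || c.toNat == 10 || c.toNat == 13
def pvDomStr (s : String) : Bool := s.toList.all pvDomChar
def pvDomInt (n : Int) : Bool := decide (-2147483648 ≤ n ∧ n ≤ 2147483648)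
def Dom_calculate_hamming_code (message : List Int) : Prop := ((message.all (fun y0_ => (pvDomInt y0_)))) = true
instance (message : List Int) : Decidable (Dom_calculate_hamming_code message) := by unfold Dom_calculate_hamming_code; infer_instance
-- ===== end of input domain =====

-- B replaces A's run-time matrix multiplication by a precomputed 16-entry codeword
-- lookup table indexed by the packed parity bits of the message (objective: alternative).

-- ===== PORT A =====
def hammingG : List (List Int) :=
  [[1, 1, 0, 1, 0, 0, 0],
   [0, 1, 1, 0, 1, 0, 0],
   [0, 0, 1, 1, 0, 1, 0],
   [0, 0, 0, 1, 1, 0, 1]]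

def calculate_hamming_code (message : List Int) : List Int :=
  let k : Int := message.length
  let r : Int := (hammingG.headD []).length
  (PySem.List.pyRange 0 r 1).foldl (fun code_word i =>
    let s : Int := (PySem.List.pyRange 0 k 1).foldl (fun s j =>
      s + ((PySem.List.pyGet? message j).getD 0) *
          ((PySem.List.pyGet? ((PySem.List.pyGet? hammingG j).getD []) i).getD 0)) 0
    code_word ++ [PySem.Int.mod s 2]) []

-- ===== PORT B =====
def pvCodewords : List (List Int) :=
  [[0, 0, 0, 0, 0, 0, 0], [1, 1, 0, 1, 0, 0, 0], [0, 1, 1, 0, 1, 0, 0],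
   [1, 0, 1, 1, 1, 0, 0], [0, 0, 1, 1, 0, 1, 0], [1, 1, 1, 0, 0, 1, 0],
   [0, 1, 0, 1, 1, 1, 0], [1, 0, 0, 0, 1, 1, 0], [0, 0, 0, 1, 1, 0, 1],
   [1, 1, 0, 0, 1, 0, 1], [0, 1, 1, 1, 0, 0, 1], [1, 0, 1, 0, 0, 0, 1],
   [0, 0, 1, 0, 1, 1, 1], [1, 1, 1, 1, 1, 1, 1], [0, 1, 0, 0, 0, 1, 1],
   [1, 0, 0, 1, 0, 1, 1]]

-- '(m % 2) << j' is ported as '<<< jm.1.toNat': the index from enumerate is nonnegative, where toNat is exact.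
-- 'list(CODEWORDS[index])' is 'CODEWORDS[index]': the list(...) copy is an identity on immutable Lean lists.
def calculate_hamming_code_alt (message : List Int) : List Int :=
  let index : Int := (PySem.List.enumerate message 0).foldl
    (fun index jm => PySem.Int.bor index ((PySem.Int.mod jm.2 2) <<< jm.1.toNat)) 0
  (PySem.List.pyGet? pvCodewords index).getD []

-- ===== PRECONDITION & SPEC =====
-- Pre_ excludes messages longer than 4: there A raises IndexError (G has only 4 rows).
def Pre_calculate_hamming_code (message : List Int) : Prop := message.length ≤ 4
instance (message : List Int) : Decidable (Pre_calculate_hamming_code message) := by unfold Pre_calculate_hamming_code; infer_instance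
def pvWitness_calculate_hamming_code : List Int := [1, 0, 1, 1]

def Spec_calculate_hamming_code (message : List Int) (out : List Int) : Prop := out = calculate_hamming_code_alt message
instance (message : List Int) (out : List Int) : Decidable (Spec_calculate_hamming_code message out) := by unfold Spec_calculate_hamming_code; infer_instance

-- ===== CLAIM (what is proved, stated in full; the proofs are below) =====
def Claim_equal_calculate_hamming_code : Prop := ∀ (message : List Int), Dom_calculate_hamming_code message → Pre_calculate_hamming_code message → Spec_calculate_hamming_code message (calculate_hamming_code message)

-- ===== LEMMAS AND PROOFS =====
theorem pvMod2_cases (a : Int) : PySem.Int.mod a 2 = 0 ∨ PySem.Int.mod a 2 = 1 := by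
  rw [PySem.Int.mod_eq_emod_of_pos (by norm_num)]; omega

theorem pvMod2_add (x y : Int) : PySem.Int.mod (x + y) 2 =
    PySem.Int.mod (PySem.Int.mod x 2 + PySem.Int.mod y 2) 2 := by
  rw [PySem.Int.mod_eq_emod_of_pos (by norm_num), PySem.Int.mod_eq_emod_of_pos (by norm_num),
    PySem.Int.mod_eq_emod_of_pos (by norm_num), PySem.Int.mod_eq_emod_of_pos (by norm_num)]
  omega

theorem pvAeval1 (a : Int) : calculate_hamming_code [a] =
    [PySem.Int.mod a 2, PySem.Int.mod a 2, PySem.Int.mod 0 2, PySem.Int.mod a 2,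
     PySem.Int.mod 0 2, PySem.Int.mod 0 2, PySem.Int.mod 0 2] := by
  simp only [calculate_hamming_code, hammingG, List.length_cons, List.length_nil, List.headD]
  norm_num [PySem.List.pyRange, List.range_succ]
  simp [List.range_succ, PySem.List.pyGet?, PySem.List.pyIdx?]
  try norm_num [PySem.Int.mod, add_comm, add_left_comm, add_assoc]

theorem pvAeval2 (a b : Int) : calculate_hamming_code [a, b] =
    [PySem.Int.mod a 2, PySem.Int.mod (a + b) 2, PySem.Int.mod b 2, PySem.Int.mod a 2,
     PySem.Int.mod b 2, PySem.Int.mod 0 2, PySem.Int.mod 0 2] := by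
  simp only [calculate_hamming_code, hammingG, List.length_cons, List.length_nil, List.headD]
  norm_num [PySem.List.pyRange, List.range_succ]
  simp [List.range_succ, PySem.List.pyGet?, PySem.List.pyIdx?]
  try norm_num [PySem.Int.mod, add_comm, add_left_comm, add_assoc]

theorem pvAeval3 (a b c : Int) : calculate_hamming_code [a, b, c] =
    [PySem.Int.mod a 2, PySem.Int.mod (a + b) 2, PySem.Int.mod (b + c) 2,
     PySem.Int.mod (a + c) 2, PySem.Int.mod b 2, PySem.Int.mod c 2, PySem.Int.mod 0 2] := by
  simp only [calculate_hamming_code, hammingG, List.length_cons, List.length_nil, List.headD]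
  norm_num [PySem.List.pyRange, List.range_succ]
  simp [List.range_succ, PySem.List.pyGet?, PySem.List.pyIdx?]
  try norm_num [PySem.Int.mod, add_comm, add_left_comm, add_assoc]

theorem pvAeval4 (a b c d : Int) : calculate_hamming_code [a, b, c, d] =
    [PySem.Int.mod a 2, PySem.Int.mod (a + b) 2, PySem.Int.mod (b + c) 2,
     PySem.Int.mod (a + c + d) 2, PySem.Int.mod (b + d) 2, PySem.Int.mod c 2,
     PySem.Int.mod d 2] := by
  simp only [calculate_hamming_code, hammingG, List.length_cons, List.length_nil, List.headD]
  norm_num [PySem.List.pyRange, List.range_succ]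
  simp [List.range_succ, PySem.List.pyGet?, PySem.List.pyIdx?]
  try norm_num [PySem.Int.mod, add_comm, add_left_comm, add_assoc]

-- ===== VERDICT (by name: the statement is the Claim_ definition above) =====
theorem calculate_hamming_code_spec : Claim_equal_calculate_hamming_code := by
  intro message _ hpre
  unfold Spec_calculate_hamming_code
  match message, hpre with
  | [], _ => decide
  | [a], _ =>
    rw [pvAeval1 a]
    simp only [calculate_hamming_code_alt, PySem.List.enumerate_cons, PySem.List.enumerate_nil,
      List.foldl]
    rcases pvMod2_cases a with ha | ha <;> simp only [ha] <;> decide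
  | [a, b], _ =>
    rw [pvAeval2 a b, pvMod2_add a b]
    simp only [calculate_hamming_code_alt, PySem.List.enumerate_cons, PySem.List.enumerate_nil,
      List.foldl]
    rcases pvMod2_cases a with ha | ha <;> rcases pvMod2_cases b with hb | hb <;>
      simp only [ha, hb] <;> decide
  | [a, b, c], _ =>
    rw [pvAeval3 a b c, pvMod2_add a b, pvMod2_add b c, pvMod2_add a c]
    simp only [calculate_hamming_code_alt, PySem.List.enumerate_cons, PySem.List.enumerate_nil,
      List.foldl]
    rcases pvMod2_cases a with ha | ha <;> rcases pvMod2_cases b with hb | hb <;>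
      rcases pvMod2_cases c with hc | hc <;> simp only [ha, hb, hc] <;> decide
  | [a, b, c, d], _ =>
    rw [pvAeval4 a b c d, pvMod2_add a b, pvMod2_add b c, pvMod2_add (a + c) d,
      pvMod2_add a c, pvMod2_add b d]
    simp only [calculate_hamming_code_alt, PySem.List.enumerate_cons, PySem.List.enumerate_nil,
      List.foldl]
    rcases pvMod2_cases a with ha | ha <;> rcases pvMod2_cases b with hb | hb <;>
      rcases pvMod2_cases c with hc | hc <;> rcases pvMod2_cases d with hd | hd <;>
      simp only [ha, hb, hc, hd] <;> decide
  | _ :: _ :: _ :: _ :: _ :: _, h => exact absurd h (by simp [Pre_calculate_hamming_code])
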